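-- pv_equiv track=rewrite | github.com/jazzm0/hackerrank | knapsack.py | solve
-- ===== SOURCE A (Python) =====
-- def solve(target, array, target_values=None):
--     if target_values is None:
--         target_values = set()
--
--     target_values.add(target)
--
--     if target == 0:
--         return target_values
--
--     if target < 0:
--         return None
--
--     for i in range(len(array)):
--         if array[i] <= target:
--             solve(target - array[i], array, target_values)
--             if 0 in target_values:
--                 return target_values
--
--     return target_values
-- ===== SOURCE B (Python) =====
-- # Iterative DFS with an explicit stack of (node, next-child-index) frames and a
-- # 'seen' memo set, replacing A's unmemoized recursion: each distinct value is
-- # expanded at most once.  Mutates the caller-supplied set in place, like A.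
-- def solve(target, array, target_values=None):
--     if target_values is None:
--         target_values = set()
--
--     target_values.add(target)
--
--     if target == 0:
--         return target_values
--
--     if target < 0:
--         return None
--
--     seen = {target}
--     stack = [(target, 0)]
--     while stack:
--         t, i = stack.pop()
--         if 0 in target_values:
--             break
--         if i < len(array):
--             stack.append((t, i + 1))
--             a = array[i]
--             if a <= t:
--                 c = t - a
--                 target_values.add(c)
--                 if c != 0 and c not in seen:
--                     seen.add(c)
--                     stack.append((c, 0))
--     return target_values
-- ===== Notes on version B (the rewrite author's own statement) =====
-- stated objective: alternative
-- what changed: B replaces A's unmemoized recursion by an iterative depth-first search over an explicit stack of (node, next-child-index) frames with a 'seen' memo set, so each distinct value is expanded at most once instead of being re-explored on every repeat.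
-- outside the precondition, e.g. on solve(1, [1, 0], None): A returns {0, 1}, B returns {0, 1}; on solve(2, [0], None): A raises RecursionError, B returns {2}; on solve(2, [1], {0}): A returns {0, 1, 2}, B returns {0, 2}
import Mathlib
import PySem

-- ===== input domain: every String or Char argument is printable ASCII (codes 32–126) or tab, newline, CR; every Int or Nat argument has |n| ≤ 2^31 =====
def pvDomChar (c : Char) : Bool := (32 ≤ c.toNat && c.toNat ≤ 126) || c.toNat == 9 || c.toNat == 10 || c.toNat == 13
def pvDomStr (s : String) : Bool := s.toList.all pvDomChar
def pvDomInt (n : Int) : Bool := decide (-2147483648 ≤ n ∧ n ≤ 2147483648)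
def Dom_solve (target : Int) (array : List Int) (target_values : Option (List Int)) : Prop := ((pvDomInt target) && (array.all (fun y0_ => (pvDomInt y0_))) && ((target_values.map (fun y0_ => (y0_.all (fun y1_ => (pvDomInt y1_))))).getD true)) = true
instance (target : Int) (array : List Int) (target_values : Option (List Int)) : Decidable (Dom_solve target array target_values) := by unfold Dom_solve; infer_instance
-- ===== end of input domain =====

-- B replaces A's unmemoized recursion by an iterative DFS over an explicit stack of
-- (node, next-child-index) frames with a 'seen' memo set, so each distinct value is
-- expanded at most once.  Both Pythons mutate the caller-supplied set in place; the
-- equivalence proved here is about the return value.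

-- ===== PORT A =====
-- A's recursive search; fuel is only a totality guard (Python has no fuel).
-- visitA = a recursive call of Python's solve (mutated set threaded through);
-- loopA = the 'for i in range(len(array))' loop with its early return on '0 in target_values'.
def loopA (visit : Int → List Int → List Int) (t : Int) : List Int → List Int → List Int
  | [], tv => tv
  | a :: rest, tv =>
    if a ≤ t then
      let tv' := visit (t - a) tv
      if (0:Int) ∈ tv' then tv' else loopA visit t rest tv'
    else loopA visit t rest tv

def visitA (arr : List Int) : Nat → Int → List Int → List Int
  | 0, _, tv => tv
  | fuel+1, t, tv =>
    let tv1 := PySem.Set.add tv t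
    if t = 0 then tv1
    else if t < 0 then tv1
    else loopA (visitA arr fuel) t arr tv1

def solve (target : Int) (array : List Int) (target_values : Option (List Int)) : Option (List Int) :=
  let tv0 := target_values.getD []
  let tv1 := PySem.Set.add tv0 target
  if target = 0 then some tv1
  else if target < 0 then none
  else some (loopA (visitA array target.toNat) target array tv1)

-- ===== PORT B =====
-- B's stack machine.  A frame is (node t, next child index i), exactly as in the
-- Python; the Nat 'fuel' is ONLY a totality guard (absent from the Python): under
-- Pre_ the initial fuel, a weight bound on the start frame, is proven sufficient.
def runB (arr : List Int) : Nat → (List Int × List Int) → List (Int × Nat) → List Int × List Int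
  | 0, st, _ => st
  | _ + 1, st, [] => st
  | fuel + 1, st, (t, i) :: rest =>
    if (0:Int) ∈ st.1 then st
    else if h : i < arr.length then
      if arr[i] ≤ t then
        if t - arr[i] ≠ 0 ∧ t - arr[i] ∉ st.2 then
          runB arr fuel (PySem.Set.add st.1 (t - arr[i]), PySem.Set.add st.2 (t - arr[i]))
            ((t - arr[i], 0) :: (t, i + 1) :: rest)
        else
          runB arr fuel (PySem.Set.add st.1 (t - arr[i]), st.2) ((t, i + 1) :: rest)
      else runB arr fuel st ((t, i + 1) :: rest)
    else runB arr fuel st rest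

def solve_alt (target : Int) (array : List Int) (target_values : Option (List Int)) : Option (List Int) :=
  let tv0 := target_values.getD []
  let tv1 := PySem.Set.add tv0 target
  if target = 0 then some tv1
  else if target < 0 then none
  else some (runB array ((array.length + 3) ^ target.toNat * (array.length + 1) + 1)
    (tv1, PySem.Set.add [] target) [(target, 0)]).1

-- ===== PRECONDITION & SPEC =====
-- Pre_ excludes, for a positive target, (a) a nonpositive array element — there A's
-- recursion is unbounded (RecursionError) on most such inputs and B does not terminate
-- on negative elements; the few such inputs where A happens to return are excluded
-- too — and (b) a caller-supplied set already containing 0, on which A's partial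
-- leftmost-path exploration before its early exit is an accident of where A checks
-- '0 in target_values'; B stops immediately there, which is equally defensible.
def Pre_solve (target : Int) (array : List Int) (target_values : Option (List Int)) : Prop :=
  (decide (target ≤ 0) || (array.all (fun a => decide (1 ≤ a)) &&
    !((target_values.getD []).contains (0:Int)))) = true
instance (target : Int) (array : List Int) (target_values : Option (List Int)) : Decidable (Pre_solve target array target_values) := by unfold Pre_solve; infer_instance
def pvWitness_solve : Int × List Int × Option (List Int) := (5, [2, 3], none)

def Spec_solve (target : Int) (array : List Int) (target_values : Option (List Int)) (out : Option (List Int)) : Prop := out = solve_alt target array target_values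
instance (target : Int) (array : List Int) (target_values : Option (List Int)) (out : Option (List Int)) : Decidable (Spec_solve target array target_values out) := by unfold Spec_solve; infer_instance

-- ===== CLAIM =====
def Claim_equal_solve : Prop := ∀ (target : Int) (array : List Int) (target_values : Option (List Int)), Dom_solve target array target_values → Pre_solve target array target_values → Spec_solve target array target_values (solve target array target_values)

-- ===== LEMMAS AND PROOFS =====

theorem Pre_iff (target : Int) (array : List Int) (target_values : Option (List Int)) :
    Pre_solve target array target_values ↔
      (0 < target → (∀ a ∈ array, 1 ≤ a) ∧ (0:Int) ∉ target_values.getD []) := by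
  unfold Pre_solve
  by_cases h : 0 < target
  · simp [show ¬ target ≤ 0 by omega, h, List.all_eq_true]
  · simp [show target ≤ 0 by omega, h]

-- Proof-side recursive rendering of the memoized DFS: loopB/dfsB.  nodeSim shows the
-- stack machine runB computes it; main_sim shows A's unmemoized search computes it too.
def loopB (dfs : Int → List Int × List Int → List Int × List Int) (t : Int) :
    List Int → List Int × List Int → List Int × List Int
  | [], st => st
  | a :: rest, (tv, ex) =>
    if a ≤ t then
      let c := t - a
      let tv1 := PySem.Set.add tv c
      let st' := if c ≠ 0 ∧ c ∉ ex then dfs c (tv1, PySem.Set.add ex c) else (tv1, ex)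
      if (0:Int) ∈ st'.1 then st' else loopB dfs t rest st'
    else loopB dfs t rest (tv, ex)

def dfsB (arr : List Int) : Nat → Int → List Int × List Int → List Int × List Int
  | 0, _, st => st
  | fuel+1, t, st => loopB (dfsB arr fuel) t arr st

-- Frame weights: fuel accounting for runB (proof side only).
def pvFw (L : Nat) (fr : Int × Nat) : Nat := (L + 3) ^ fr.1.toNat * (L + 1 - fr.2) + 1
def pvWsum (L : Nat) (stack : List (Int × Nat)) : Nat := (stack.map (pvFw L)).sum

theorem pvDec_pop (L : Nat) (fr : Int × Nat) (rest : List (Int × Nat)) :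
    pvWsum L rest < pvWsum L (fr :: rest) := by
  simp only [pvWsum, List.map_cons, List.sum_cons, pvFw]
  omega

theorem pvDec_adv (L : Nat) (t : Int) (i : Nat) (rest : List (Int × Nat)) (hi : i < L) :
    pvWsum L ((t, i + 1) :: rest) < pvWsum L ((t, i) :: rest) := by
  simp only [pvWsum, List.map_cons, List.sum_cons, pvFw]
  have hp : 0 < (L + 3) ^ t.toNat := pow_pos (by omega) _
  have h2 : L + 1 - (i + 1) < L + 1 - i := by omega
  have := mul_lt_mul_of_pos_left h2 hp
  omega

theorem pvDec_desc (L : Nat) (t c : Int) (i : Nat) (rest : List (Int × Nat))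
    (hi : i < L) (hct : c.toNat < t.toNat) :
    pvWsum L ((c, 0) :: (t, i + 1) :: rest) < pvWsum L ((t, i) :: rest) := by
  simp only [pvWsum, List.map_cons, List.sum_cons, pvFw, Nat.sub_zero]
  have hp : 1 ≤ (L + 3) ^ c.toNat := Nat.one_le_pow _ _ (by omega)
  have hpow : (L + 3) ^ c.toNat * (L + 3) ≤ (L + 3) ^ t.toNat := by
    calc (L + 3) ^ c.toNat * (L + 3) = (L + 3) ^ (c.toNat + 1) := (pow_succ _ _).symm
    _ ≤ (L + 3) ^ t.toNat := Nat.pow_le_pow_right (by omega) (by omega)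
  have h1 : L + 1 - i = (L - i - 1) + 2 := by omega
  have h2 : L + 1 - (i + 1) = (L - i - 1) + 1 := by omega
  rw [h1, h2]
  set p := (L + 3) ^ c.toNat
  set q := (L + 3) ^ t.toNat
  set k := L - i - 1
  have hq : q * (k + 2) = q * (k + 1) + q := by ring
  have hple : p * (L + 1) + 2 ≤ q := by nlinarith
  omega

-- The machine's result does not change once the fuel covers the stack's weight.
theorem runB_grow (arr : List Int) (harr : ∀ a ∈ arr, 1 ≤ a) :
    ∀ f : Nat, ∀ st : List Int × List Int, ∀ stack : List (Int × Nat),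
      pvWsum arr.length stack ≤ f → runB arr f st stack = runB arr (f + 1) st stack := by
  intro f
  induction f with
  | zero =>
    intro st stack h
    cases stack with
    | nil => rfl
    | cons fr rest =>
      exfalso
      have := pvDec_pop arr.length fr rest
      omega
  | succ f ih =>
    intro st stack h
    cases stack with
    | nil => rfl
    | cons fr rest =>
      obtain ⟨t, i⟩ := fr
      conv_lhs => rw [runB]
      conv_rhs => rw [runB]
      by_cases h0 : (0:Int) ∈ st.1
      · simp [h0]
      · simp only [if_neg h0]
        by_cases hi : i < arr.length
        · simp only [dif_pos hi]
          have ha1 : 1 ≤ arr[i] := harr _ (arr.getElem_mem hi)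
          by_cases hle : arr[i] ≤ t
          · simp only [if_pos hle]
            by_cases hg : t - arr[i] ≠ 0 ∧ t - arr[i] ∉ st.2
            · simp only [if_pos hg]
              refine ih _ _ ?_
              have hct : (t - arr[i]).toNat < t.toNat := by omega
              have := pvDec_desc arr.length t (t - arr[i]) i rest hi hct
              omega
            · simp only [if_neg hg]
              refine ih _ _ ?_
              have := pvDec_adv arr.length t i rest hi
              omega
          · simp only [if_neg hle]
            refine ih _ _ ?_
            have := pvDec_adv arr.length t i rest hi
            omega
        · simp only [dif_neg hi]
          refine ih _ _ ?_
          have := pvDec_pop arr.length (t, i) rest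
          omega

theorem runB_ge (arr : List Int) (harr : ∀ a ∈ arr, 1 ≤ a)
    (f g : Nat) (st : List Int × List Int) (stack : List (Int × Nat))
    (hfg : f ≤ g) (hb : pvWsum arr.length stack ≤ f) :
    runB arr f st stack = runB arr g st stack := by
  induction g, hfg using Nat.le_induction with
  | base => rfl
  | succ g hg ih => rw [ih, runB_grow arr harr g st stack (le_trans hb hg)]

-- The stack machine simulates the recursive memoized DFS frame by frame.
theorem nodeSim (arr : List Int) (harr : ∀ a ∈ arr, 1 ≤ a) :
    ∀ fd n : Nat, ∀ t : Int, ∀ i : Nat, ∀ st : List Int × List Int,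
      ∀ rest : List (Int × Nat), ∀ F : Nat,
      arr.length - i ≤ n → 1 ≤ t → t.toNat ≤ fd → (0:Int) ∉ st.1 →
      pvWsum arr.length ((t, i) :: rest) ≤ F →
      runB arr F st ((t, i) :: rest) =
        (if (0:Int) ∈ (loopB (dfsB arr fd) t (arr.drop i) st).1
         then loopB (dfsB arr fd) t (arr.drop i) st
         else runB arr F (loopB (dfsB arr fd) t (arr.drop i) st) rest) := by
  intro fd
  induction fd with
  | zero => intro n t i st rest F _ ht hfd _ _; omega
  | succ f ihf =>
    intro n
    induction n with
    | zero =>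
      intro t i st rest F hn ht hfd h0 hF
      have hi : arr.length ≤ i := by omega
      obtain ⟨F', rfl⟩ : ∃ F', F = F' + 1 := by
        refine ⟨F - 1, ?_⟩
        have := pvDec_pop arr.length (t, i) rest
        omega
      rw [List.drop_eq_nil_of_le hi]
      have hL : loopB (dfsB arr (f + 1)) t [] st = st := rfl
      rw [hL, if_neg h0, runB, if_neg h0, dif_neg (by omega : ¬ i < arr.length)]
      refine runB_ge arr harr F' (F' + 1) st rest (Nat.le_succ _) ?_
      have := pvDec_pop arr.length (t, i) rest
      omega
    | succ m ihm =>
      intro t i st rest F hn ht hfd h0 hF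
      obtain ⟨F', rfl⟩ : ∃ F', F = F' + 1 := by
        refine ⟨F - 1, ?_⟩
        have := pvDec_pop arr.length (t, i) rest
        omega
      have hrest : pvWsum arr.length rest ≤ F' := by
        have := pvDec_pop arr.length (t, i) rest
        omega
      by_cases hi : i < arr.length
      · rcases st with ⟨tv, ex⟩
        have hdrop : arr.drop i = arr[i] :: arr.drop (i + 1) := List.drop_eq_getElem_cons hi
        have ha1 : 1 ≤ arr[i] := harr _ (arr.getElem_mem hi)
        have hadv : pvWsum arr.length ((t, i + 1) :: rest) ≤ F' := by
          have := pvDec_adv arr.length t i rest hi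
          omega
        rw [hdrop]
        by_cases hle : arr[i] ≤ t
        · by_cases hguard : t - arr[i] ≠ 0 ∧ t - arr[i] ∉ ex
          · -- descend into the fresh child c = t - arr[i]
            obtain ⟨hc0, hcex⟩ := hguard
            have hc1 : 1 ≤ t - arr[i] := by omega
            have hfd' : (t - arr[i]).toNat ≤ f := by omega
            have hct : (t - arr[i]).toNat < t.toNat := by omega
            have hdesc : pvWsum arr.length ((t - arr[i], 0) :: (t, i + 1) :: rest) ≤ F' := by
              have := pvDec_desc arr.length t (t - arr[i]) i rest hi hct
              omega
            have hstep : runB arr (F' + 1) (tv, ex) ((t, i) :: rest) =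
                runB arr F' (PySem.Set.add tv (t - arr[i]), PySem.Set.add ex (t - arr[i]))
                  ((t - arr[i], 0) :: (t, i + 1) :: rest) := by
              rw [runB, if_neg h0, dif_pos hi, if_pos hle,
                if_pos (show t - arr[i] ≠ 0 ∧ t - arr[i] ∉ (tv, ex).2 from ⟨hc0, hcex⟩)]
            have h0' : (0:Int) ∉ (PySem.Set.add tv (t - arr[i])) := by
              rw [PySem.Set.mem_add]
              rintro (h | h)
              · exact h0 h
              · exact hc0 h.symm
            have hchild := ihf arr.length (t - arr[i]) 0
              (PySem.Set.add tv (t - arr[i]), PySem.Set.add ex (t - arr[i]))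
              ((t, i + 1) :: rest) F' (by omega) hc1 hfd' h0' hdesc
            rw [List.drop_zero] at hchild
            have hdfs : loopB (dfsB arr f) (t - arr[i]) arr
                (PySem.Set.add tv (t - arr[i]), PySem.Set.add ex (t - arr[i]))
                = dfsB arr (f + 1) (t - arr[i])
                  (PySem.Set.add tv (t - arr[i]), PySem.Set.add ex (t - arr[i])) := by
              simp [dfsB]
            rw [hdfs] at hchild
            have hloop : loopB (dfsB arr (f + 1)) t (arr[i] :: arr.drop (i + 1)) (tv, ex) =
                if (0:Int) ∈ (dfsB arr (f + 1) (t - arr[i])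
                    (PySem.Set.add tv (t - arr[i]), PySem.Set.add ex (t - arr[i]))).1
                then dfsB arr (f + 1) (t - arr[i])
                    (PySem.Set.add tv (t - arr[i]), PySem.Set.add ex (t - arr[i]))
                else loopB (dfsB arr (f + 1)) t (arr.drop (i + 1))
                    (dfsB arr (f + 1) (t - arr[i])
                      (PySem.Set.add tv (t - arr[i]), PySem.Set.add ex (t - arr[i]))) := by
              simp only [loopB, if_pos hle, if_pos (show t - arr[i] ≠ 0 ∧ t - arr[i] ∉ ex from
                ⟨hc0, hcex⟩)]
            rw [hstep, hchild, hloop]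
            set st' := dfsB arr (f + 1) (t - arr[i])
              (PySem.Set.add tv (t - arr[i]), PySem.Set.add ex (t - arr[i])) with hst'
            by_cases h0s : (0:Int) ∈ st'.1
            · simp [h0s]
            · rw [if_neg h0s, if_neg h0s]
              rw [ihm t (i + 1) st' rest F' (by omega) ht hfd h0s hadv]
              by_cases h0t : (0:Int) ∈ (loopB (dfsB arr (f + 1)) t (arr.drop (i + 1)) st').1
              · rw [if_pos h0t, if_pos h0t]
              · rw [if_neg h0t, if_neg h0t]
                exact runB_ge arr harr F' (F' + 1) _ rest (Nat.le_succ _) hrest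
          · -- skipped child (c = 0 or already seen)
            have hstep : runB arr (F' + 1) (tv, ex) ((t, i) :: rest) =
                runB arr F' (PySem.Set.add tv (t - arr[i]), ex) ((t, i + 1) :: rest) := by
              rw [runB, if_neg h0, dif_pos hi, if_pos hle,
                if_neg (show ¬ (t - arr[i] ≠ 0 ∧ t - arr[i] ∉ (tv, ex).2) by tauto)]
            have hloop : loopB (dfsB arr (f + 1)) t (arr[i] :: arr.drop (i + 1)) (tv, ex) =
                if (0:Int) ∈ (PySem.Set.add tv (t - arr[i]))
                then (PySem.Set.add tv (t - arr[i]), ex)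
                else loopB (dfsB arr (f + 1)) t (arr.drop (i + 1))
                  (PySem.Set.add tv (t - arr[i]), ex) := by
              simp only [loopB, if_pos hle, if_neg hguard]
            by_cases h0c : (0:Int) ∈ (PySem.Set.add tv (t - arr[i]))
            · have hfull : loopB (dfsB arr (f + 1)) t (arr[i] :: arr.drop (i + 1)) (tv, ex) =
                  (PySem.Set.add tv (t - arr[i]), ex) := by rw [hloop, if_pos h0c]
              obtain ⟨F'', rfl⟩ : ∃ F'', F' = F'' + 1 := by
                refine ⟨F' - 1, ?_⟩
                have := pvDec_pop arr.length (t, i + 1) rest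
                omega
              rw [hstep, hfull, if_pos h0c, runB]
              simp [h0c]
            · have hfull : loopB (dfsB arr (f + 1)) t (arr[i] :: arr.drop (i + 1)) (tv, ex) =
                  loopB (dfsB arr (f + 1)) t (arr.drop (i + 1))
                    (PySem.Set.add tv (t - arr[i]), ex) := by rw [hloop, if_neg h0c]
              rw [hstep, hfull]
              rw [ihm t (i + 1) (PySem.Set.add tv (t - arr[i]), ex) rest F'
                (by omega) ht hfd h0c hadv]
              by_cases h0t : (0:Int) ∈ (loopB (dfsB arr (f + 1)) t (arr.drop (i + 1))
                  (PySem.Set.add tv (t - arr[i]), ex)).1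
              · rw [if_pos h0t, if_pos h0t]
              · rw [if_neg h0t, if_neg h0t]
                exact runB_ge arr harr F' (F' + 1) _ rest (Nat.le_succ _) hrest
        · -- arr[i] > t: both sides advance
          have hstep : runB arr (F' + 1) (tv, ex) ((t, i) :: rest) =
              runB arr F' (tv, ex) ((t, i + 1) :: rest) := by
            rw [runB, if_neg h0, dif_pos hi, if_neg hle]
          have hloop : loopB (dfsB arr (f + 1)) t (arr[i] :: arr.drop (i + 1)) (tv, ex) =
              loopB (dfsB arr (f + 1)) t (arr.drop (i + 1)) (tv, ex) := by
            simp only [loopB, if_neg hle]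
          rw [hstep, hloop]
          rw [ihm t (i + 1) (tv, ex) rest F' (by omega) ht hfd h0 hadv]
          by_cases h0t : (0:Int) ∈ (loopB (dfsB arr (f + 1)) t (arr.drop (i + 1)) (tv, ex)).1
          · rw [if_pos h0t, if_pos h0t]
          · rw [if_neg h0t, if_neg h0t]
            exact runB_ge arr harr F' (F' + 1) _ rest (Nat.le_succ _) hrest
      · have hge : arr.length ≤ i := by omega
        rw [List.drop_eq_nil_of_le hge]
        have hL : loopB (dfsB arr (f + 1)) t [] st = st := rfl
        rw [hL, if_neg h0, runB, if_neg h0, dif_neg hi]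
        exact runB_ge arr harr F' (F' + 1) st rest (Nat.le_succ _) hrest

-- 'Done arr tv c': value c was fully explored with no 0 found: c and its whole reachable
-- subtree are in tv, so re-visiting c changes nothing.
inductive Done (arr : List Int) (tv : List Int) : Int → Prop
  | mk (c : Int) (hc : c ∈ tv) (h0 : c ≠ 0)
      (hch : ∀ a ∈ arr, a ≤ c → Done arr tv (c - a)) : Done arr tv c

theorem done_mono {arr tv tv' : List Int} {c : Int}
    (h : Done arr tv c) (hsub : ∀ x ∈ tv, x ∈ tv') : Done arr tv' c := by
  induction h with
  | mk c hc h0 hch ih => exact Done.mk c (hsub c hc) h0 (fun a ha hle => ih a ha hle)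

theorem visitA_noop {arr tv : List Int} {c : Int}
    (h : Done arr tv c) : ∀ fuel, visitA arr fuel c tv = tv := by
  induction h with
  | mk c hc h0 hch ih =>
    intro fuel
    match fuel with
    | 0 => simp [visitA]
    | fuel+1 =>
      have hadd : PySem.Set.add tv c = tv := PySem.Set.add_of_mem hc
      simp only [visitA, hadd, if_neg h0]
      by_cases hneg : c < 0
      · simp [hneg]
      · simp only [if_neg hneg]
        have : ∀ rest, (∀ a ∈ rest, a ∈ arr) → loopA (visitA arr fuel) c rest tv = tv := by
          intro rest
          induction rest with
          | nil => intro _; simp [loopA]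
          | cons a rest ihr =>
            intro hsub
            have ha : a ∈ arr := hsub a (List.mem_cons_self ..)
            by_cases hle : a ≤ c
            · simp only [loopA, if_pos hle, ih a ha hle fuel]
              by_cases h0m : (0:Int) ∈ tv
              · simp [h0m]
              · simp only [if_neg h0m]
                exact ihr (fun x hx => hsub x (List.mem_cons_of_mem _ hx))
            · simp only [loopA, if_neg hle]
              exact ihr (fun x hx => hsub x (List.mem_cons_of_mem _ hx))
        exact this arr (fun a ha => ha)

-- The main simulation: A's unmemoized loop and the memoized loop produce the same set,
-- and the 'explored' set stays closed (every explored value below the current node is Done).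
set_option maxHeartbeats 1000000 in
theorem main_sim (arr : List Int) (hP : ∀ a ∈ arr, 1 ≤ a) :
    ∀ fuel : Nat, ∀ t : Int, ∀ rest tv ex : List Int,
      (∀ a ∈ rest, 1 ≤ a) → 1 ≤ t → t ∈ tv → t.toNat ≤ fuel →
      (∀ d ∈ ex, d ∈ tv) → (∀ d ∈ ex, d < t → Done arr tv d) →
      loopA (visitA arr fuel) t rest tv = (loopB (dfsB arr fuel) t rest (tv, ex)).1 ∧
      (∀ x ∈ tv, x ∈ (loopB (dfsB arr fuel) t rest (tv, ex)).1) ∧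
      (∀ d ∈ (loopB (dfsB arr fuel) t rest (tv, ex)).2, d ∈ ex ∨ d < t) ∧
      (∀ d ∈ (loopB (dfsB arr fuel) t rest (tv, ex)).2, d ∈ (loopB (dfsB arr fuel) t rest (tv, ex)).1) ∧
      ((0:Int) ∉ (loopB (dfsB arr fuel) t rest (tv, ex)).1 →
        ∀ d ∈ (loopB (dfsB arr fuel) t rest (tv, ex)).2, d < t →
          Done arr (loopB (dfsB arr fuel) t rest (tv, ex)).1 d) ∧
      ((0:Int) ∉ (loopB (dfsB arr fuel) t rest (tv, ex)).1 →
        ∀ a ∈ rest, a ≤ t → Done arr (loopB (dfsB arr fuel) t rest (tv, ex)).1 (t - a)) := by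
  intro fuel
  induction fuel with
  | zero =>
    intro t rest tv ex _ ht _ hfuel _ _
    omega
  | succ f ihf =>
    intro t rest
    induction rest with
    | nil =>
      intro tv ex _ ht htv _ hexm hexd
      have hB : loopB (dfsB arr (f+1)) t [] (tv, ex) = (tv, ex) := by simp [loopB]
      have hA : loopA (visitA arr (f+1)) t [] tv = tv := by simp [loopA]
      rw [hB, hA]
      exact ⟨rfl, fun x hx => hx, fun d hd => Or.inl hd, hexm, fun _ => hexd, by simp⟩
    | cons a rest ihr =>
      intro tv ex hres ht htv hfuel hexm hexd
      have ha1 : 1 ≤ a := hres a (List.mem_cons_self ..)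
      have hres' : ∀ x ∈ rest, 1 ≤ x := fun x hx => hres x (List.mem_cons_of_mem _ hx)
      by_cases hle : a ≤ t
      · -- eligible child c = t - a
        set c := t - a with hcdef
        have hc0 : 0 ≤ c := by omega
        have hct : c < t := by omega
        by_cases hc : c = 0
        · -- child hits 0: both add 0 and stop
          have h0mem : (0:Int) ∈ PySem.Set.add tv (0:Int) := by
            rw [PySem.Set.mem_add]; right; rfl
          have hA : loopA (visitA arr (f+1)) t (a :: rest) tv = PySem.Set.add tv (0:Int) := by
            simp only [loopA, if_pos hle, ← hcdef, hc, visitA]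
            simp [h0mem]
          have hBst : loopB (dfsB arr (f+1)) t (a :: rest) (tv, ex)
              = (PySem.Set.add tv (0:Int), ex) := by
            simp only [loopB, if_pos hle, ← hcdef, hc]
            simp [h0mem]
          rw [hBst, hA]
          refine ⟨rfl, ?_, fun d hd => Or.inl hd, ?_, ?_, ?_⟩
          · intro x hx; rw [PySem.Set.mem_add]; exact Or.inl hx
          · intro d hd; rw [PySem.Set.mem_add]; exact Or.inl (hexm d hd)
          · intro h0; exact absurd h0mem h0
          · intro h0; exact absurd h0mem h0
        · -- c ≠ 0, so 1 ≤ c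
          have hc1 : 1 ≤ c := by omega
          by_cases hex : c ∈ ex
          · -- memoized skip: revisiting c changes nothing
            have hcin : c ∈ tv := hexm c hex
            have hdone : Done arr tv c := hexd c hex hct
            have hadd : PySem.Set.add tv c = tv := PySem.Set.add_of_mem hcin
            have hA0 : visitA arr (f+1) c tv = tv := visitA_noop hdone (f+1)
            have hguard : ¬ (c ≠ 0 ∧ c ∉ ex) := by simp [hex]
            have hAu : loopA (visitA arr (f+1)) t (a :: rest) tv
                = if (0:Int) ∈ tv then tv else loopA (visitA arr (f+1)) t rest tv := by
              simp only [loopA, if_pos hle, ← hcdef, hA0]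
            have hBu : loopB (dfsB arr (f+1)) t (a :: rest) (tv, ex)
                = if (0:Int) ∈ tv then (tv, ex) else loopB (dfsB arr (f+1)) t rest (tv, ex) := by
              simp only [loopB, if_pos hle, ← hcdef, if_neg hguard, hadd]
            by_cases h0m : (0:Int) ∈ tv
            · rw [hAu, hBu, if_pos h0m, if_pos h0m]
              exact ⟨rfl, fun x hx => hx, fun d hd => Or.inl hd, hexm,
                fun h0 => absurd h0m h0, fun h0 => absurd h0m h0⟩
            · rw [hAu, hBu, if_neg h0m, if_neg h0m]
              obtain ⟨e1, e2, e3, e4, e5, e6⟩ :=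
                ihr tv ex hres' ht htv hfuel hexm hexd
              refine ⟨e1, e2, e3, e4, e5, ?_⟩
              intro h0 x hx hxle
              rcases List.mem_cons.mp hx with hxa | hxr
              · subst hxa
                exact done_mono hdone (fun y hy => e2 y hy)
              · exact e6 h0 x hxr hxle
          · -- fresh child: both descend into c (the memoized side marks it explored)
            have hfc : c.toNat ≤ f := by omega
            have hcin1 : c ∈ PySem.Set.add tv c := by
              rw [PySem.Set.mem_add]; right; rfl
            have hmemadd : ∀ x ∈ tv, x ∈ PySem.Set.add tv c := by
              intro x hx; rw [PySem.Set.mem_add]; exact Or.inl hx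
            have hexm' : ∀ d ∈ PySem.Set.add ex c, d ∈ PySem.Set.add tv c := by
              intro d hd; rw [PySem.Set.mem_add] at hd ⊢
              rcases hd with hd | hd
              · exact Or.inl (hexm d hd)
              · exact Or.inr hd
            have hexd' : ∀ d ∈ PySem.Set.add ex c, d < c →
                Done arr (PySem.Set.add tv c) d := by
              intro d hd hdc
              rw [PySem.Set.mem_add] at hd
              rcases hd with hd | hd
              · exact done_mono (hexd d hd (by omega)) hmemadd
              · omega
            obtain ⟨c1, c2, c3, c4, c5, c6⟩ :=
              ihf c arr (PySem.Set.add tv c) (PySem.Set.add ex c) hP hc1 hcin1 hfc hexm' hexd'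
            set st' := loopB (dfsB arr f) c arr (PySem.Set.add tv c, PySem.Set.add ex c) with hst'
            have hA0 : visitA arr (f+1) c tv = st'.1 := by
              simp only [visitA, if_neg hc, if_neg (by omega : ¬ c < 0)]
              exact c1
            have hguard : (c ≠ 0 ∧ c ∉ ex) := ⟨hc, hex⟩
            have hBhead : dfsB arr (f+1) c (PySem.Set.add tv c, PySem.Set.add ex c) = st' := by
              simp only [dfsB]
              exact hst'.symm
            have hAu : loopA (visitA arr (f+1)) t (a :: rest) tv
                = if (0:Int) ∈ st'.1 then st'.1 else loopA (visitA arr (f+1)) t rest st'.1 := by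
              simp only [loopA, if_pos hle, ← hcdef, hA0]
            have hBu : loopB (dfsB arr (f+1)) t (a :: rest) (tv, ex)
                = if (0:Int) ∈ st'.1 then st' else loopB (dfsB arr (f+1)) t rest st' := by
              simp only [loopB, if_pos hle, ← hcdef, if_pos hguard, hBhead]
            have htv2 : ∀ x ∈ tv, x ∈ st'.1 := fun x hx => c2 x (hmemadd x hx)
            have hex2lt : ∀ d ∈ st'.2, d ∈ ex ∨ d < t := by
              intro d hd
              rcases c3 d hd with hd' | hd'
              · rw [PySem.Set.mem_add] at hd'
                rcases hd' with h | h
                · exact Or.inl h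
                · exact Or.inr (by omega)
              · exact Or.inr (by omega)
            by_cases h0m : (0:Int) ∈ st'.1
            · rw [hAu, hBu, if_pos h0m, if_pos h0m]
              exact ⟨rfl, htv2, hex2lt, c4,
                fun h0 => absurd h0m h0, fun h0 => absurd h0m h0⟩
            · rw [hAu, hBu, if_neg h0m, if_neg h0m]
              have hdonec : Done arr st'.1 c :=
                Done.mk c (c2 c hcin1) hc (fun a' ha' hle' => c6 h0m a' ha' hle')
              have hexd2 : ∀ d ∈ st'.2, d < t → Done arr st'.1 d := by
                intro d hd hdt
                rcases c3 d hd with hd' | hd'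
                · rw [PySem.Set.mem_add] at hd'
                  rcases hd' with h | h
                  · exact done_mono (hexd d h hdt) htv2
                  · subst h; exact hdonec
                · exact c5 h0m d hd hd'
              obtain ⟨e1, e2, e3, e4, e5, e6⟩ :=
                ihr st'.1 st'.2 hres' ht (htv2 t htv) hfuel c4 hexd2
              refine ⟨e1, fun x hx => e2 x (htv2 x hx), ?_, e4, e5, ?_⟩
              · intro d hd
                rcases e3 d hd with hd' | hd'
                · exact hex2lt d hd'
                · exact Or.inr hd'
              · intro h0 x hx hxle
                rcases List.mem_cons.mp hx with hxa | hxr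
                · subst hxa
                  exact done_mono hdonec (fun y hy => e2 y hy)
                · exact e6 h0 x hxr hxle
      · -- a > t: both skip this element
        obtain ⟨e1, e2, e3, e4, e5, e6⟩ := ihr tv ex hres' ht htv hfuel hexm hexd
        have hBst : loopB (dfsB arr (f+1)) t (a :: rest) (tv, ex)
            = loopB (dfsB arr (f+1)) t rest (tv, ex) := by
          simp only [loopB, if_neg hle]
        have hAst : loopA (visitA arr (f+1)) t (a :: rest) tv
            = loopA (visitA arr (f+1)) t rest tv := by
          simp only [loopA, if_neg hle]
        rw [hBst, hAst]
        refine ⟨e1, e2, e3, e4, e5, ?_⟩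
        intro h0 x hx hxle
        rcases List.mem_cons.mp hx with hxa | hxr
        · omega
        · exact e6 h0 x hxr hxle

-- ===== VERDICT =====
theorem solve_spec : Claim_equal_solve := by
  unfold Claim_equal_solve
  intro target array target_values _ hpre
  unfold Spec_solve solve solve_alt
  by_cases h0 : target = 0
  · simp [h0]
  · by_cases hneg : target < 0
    · simp [h0, hneg]
    · have ht1 : 1 ≤ target := by omega
      obtain ⟨hP, h0tv0⟩ := (Pre_iff target array target_values).mp hpre (by omega)
      simp only [if_neg h0, if_neg hneg]
      set tv1 := PySem.Set.add (target_values.getD []) target with htv1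
      have htmem : target ∈ tv1 := by
        rw [htv1, PySem.Set.mem_add]; right; rfl
      have h0tv1 : (0:Int) ∉ tv1 := by
        rw [htv1, PySem.Set.mem_add]
        rintro (h | h)
        · exact h0tv0 h
        · exact h0 h.symm
      have hex : PySem.Set.add ([] : List Int) target = [target] := by
        simp [PySem.Set.add]
      have hFb : pvWsum array.length [(target, 0)] ≤
          (array.length + 3) ^ target.toNat * (array.length + 1) + 1 := by
        simp [pvWsum, pvFw]
      have hmach := nodeSim array hP target.toNat array.length target 0 (tv1, [target]) []
        ((array.length + 3) ^ target.toNat * (array.length + 1) + 1)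
        (by omega) ht1 (le_refl _) h0tv1 hFb
      rw [List.drop_zero] at hmach
      obtain ⟨e1, _⟩ :=
        main_sim array hP target.toNat target array tv1 [target] hP ht1 htmem (le_refl _)
          (by intro d hd; simp only [List.mem_singleton] at hd; subst hd; exact htmem)
          (by intro d hd; simp only [List.mem_singleton] at hd; subst hd; intro h; omega)
      rw [hex, hmach]
      by_cases h0f : (0:Int) ∈ (loopB (dfsB array target.toNat) target array (tv1, [target])).1
      · rw [if_pos h0f]
        exact congrArg some e1
      · rw [if_neg h0f, runB]
        exact congrArg some e1
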